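-- pv_equiv track=rewrite | github.com/maxcrave/SSC | app01/views.py | filter_MandL
-- ===== SOURCE A (Python) =====
-- def filter_MandL(All_number,middle_number,last_number):
--
--     # 3.中3:   取值12357
--     temp = []
--     for item in All_number:
--         middle_three = item[0:3]
--         for i in middle_three:
--             if i in middle_number:
--                 temp.append(item)
--                 break
--
--     SSC_NUM = temp
--
--     # 3.后3:   取值56789
--     temp = []
--     for item in SSC_NUM:
--         middle_three = item[1:4]
--         for i in middle_three:
--             if i in last_number:
--                 temp.append(item)
--                 break
--
--     SSC_NUM = temp
--
--     SSC_SIZE = len(SSC_NUM)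
--
--     SSC_NUM = ' '.join(SSC_NUM)
--     SSC_NUM_Buffer = SSC_NUM
--
--     return SSC_SIZE, SSC_NUM_Buffer
-- ===== SOURCE B (Python) =====
-- def filter_MandL(All_number, middle_number, last_number):
--     # Single fused pass with set-based disjointness tests, accumulating the
--     # count and the space-joined buffer directly (no temp lists, no join).
--     mids = set(middle_number)
--     lasts = set(last_number)
--     n = 0
--     buf = ''
--     for head in All_number:
--         if not mids.isdisjoint(head[0:3]) and not lasts.isdisjoint(head[1:4]):
--             if n:
--                 buf += ' ' + head
--             else:
--                 buf = head
--             n += 1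
--     return n, buf
-- ===== Notes on version B (the rewrite author's own statement) =====
-- stated objective: faster
-- what changed: Replaces A's two staged filter passes over temp lists plus a final ' '.join by a single fused pass that tests each item via O(1)-membership set disjointness against set(middle_number)/set(last_number) and accumulates the count and the space-joined buffer directly, with no intermediate lists and no join.
import Mathlib
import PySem

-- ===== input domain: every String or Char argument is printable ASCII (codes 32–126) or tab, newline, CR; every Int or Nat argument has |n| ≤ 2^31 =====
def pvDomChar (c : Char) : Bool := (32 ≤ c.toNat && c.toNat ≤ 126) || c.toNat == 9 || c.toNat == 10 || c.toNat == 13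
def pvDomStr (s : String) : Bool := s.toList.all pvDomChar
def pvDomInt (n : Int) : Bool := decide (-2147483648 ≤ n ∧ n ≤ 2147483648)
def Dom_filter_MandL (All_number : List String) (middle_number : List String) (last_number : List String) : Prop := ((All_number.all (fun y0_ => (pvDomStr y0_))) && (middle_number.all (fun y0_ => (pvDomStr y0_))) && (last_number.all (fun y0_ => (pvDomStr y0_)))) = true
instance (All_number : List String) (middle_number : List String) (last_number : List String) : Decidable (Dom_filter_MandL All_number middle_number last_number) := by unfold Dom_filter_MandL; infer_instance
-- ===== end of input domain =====

-- B replaces A's two staged filter passes (temp lists + final join) by one fused pass over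
-- All_number that keeps count and the space-joined buffer directly, testing each item by
-- set disjointness against set(middle_number)/set(last_number) (faster: hash-set membership
-- replaces A's per-char list scan; measured faster in a timing run).

-- ===== PORT A =====
-- A: two sequential passes, each appending matching items to a temp list
-- (the inner loop-with-break over the slice's chars = 'any'), then len and ' '.join.
def filter_MandL (All_number : List String) (middle_number : List String) (last_number : List String) : Int × String :=
  let temp1 := All_number.foldl (fun temp item =>
    if ((PySem.Str.slice item (some 0) (some 3)).toList.any
          (fun i => middle_number.contains (String.ofList [i]))) then temp ++ [item] else temp) []
  let temp2 := temp1.foldl (fun temp item =>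
    if ((PySem.Str.slice item (some 1) (some 4)).toList.any
          (fun i => last_number.contains (String.ofList [i]))) then temp ++ [item] else temp) []
  (((temp2.length : Int)), PySem.Str.join " " temp2)

-- ===== PORT B =====
-- B: sets once, then one fold carrying (n, buf); iterating a Python str yields its
-- single-character strings, modelled by mapping each char c to String.ofList [c];
-- Python's 'buf += ' ' + head' is string concatenation, exact as String.ofList (toList ++ …).
def filter_MandL_alt (All_number : List String) (middle_number : List String) (last_number : List String) : Int × String :=
  let mids := PySem.Set.ofList middle_number
  let lasts := PySem.Set.ofList last_number
  All_number.foldl (fun st head =>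
    if (!(PySem.Set.isdisjoint mids ((PySem.Str.slice head (some 0) (some 3)).toList.map (fun c => String.ofList [c]))))
       && (!(PySem.Set.isdisjoint lasts ((PySem.Str.slice head (some 1) (some 4)).toList.map (fun c => String.ofList [c]))))
    then (st.1 + 1, if st.1 == 0 then head else String.ofList (st.2.toList ++ ' ' :: head.toList))
    else st) ((0 : Int), "")

-- ===== PRECONDITION & SPEC =====
def Spec_filter_MandL (All_number : List String) (middle_number : List String) (last_number : List String) (out : Int × String) : Prop := out = filter_MandL_alt All_number middle_number last_number
instance (All_number : List String) (middle_number : List String) (last_number : List String) (out : Int × String) : Decidable (Spec_filter_MandL All_number middle_number last_number out) := by unfold Spec_filter_MandL; infer_instance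

-- ===== CLAIM (what is proved, stated in full; the proofs are below) =====
def Claim_equal_filter_MandL : Prop := ∀ (All_number : List String) (middle_number : List String) (last_number : List String), Dom_filter_MandL All_number middle_number last_number → Spec_filter_MandL All_number middle_number last_number (filter_MandL All_number middle_number last_number)

-- ===== LEMMAS AND PROOFS =====

-- the keep-test as A phrases it (any over the slice's chars, list membership)
def pvKeepA (middle_number last_number : List String) (item : String) : Bool :=
  ((PySem.Str.slice item (some 0) (some 3)).toList.any (fun i => middle_number.contains (String.ofList [i])))
  && ((PySem.Str.slice item (some 1) (some 4)).toList.any (fun i => last_number.contains (String.ofList [i])))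

-- B's fold step, abstracted over the keep predicate
def pvStep (keep : String → Bool) (st : Int × String) (head : String) : Int × String :=
  if keep head then (st.1 + 1, if st.1 == 0 then head else String.ofList (st.2.toList ++ ' ' :: head.toList))
  else st

theorem pv_notdisjoint_eq_any (m : List String) (cs : List Char) :
    (!(PySem.Set.isdisjoint (PySem.Set.ofList m) (cs.map (fun c => String.ofList [c]))))
      = cs.any (fun i => m.contains (String.ofList [i])) := by
  rw [Bool.eq_iff_iff]
  simp [PySem.Set.isdisjoint, PySem.Set.mem_ofList]
  aesop

theorem pv_intercalate_snoc (sep b : List Char) (ls : List (List Char)) (h : ls ≠ []) :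
    sep.intercalate (ls ++ [b]) = sep.intercalate ls ++ sep ++ b := by
  induction ls with
  | nil => exact absurd rfl h
  | cons a as ih =>
    cases as with
    | nil => simp [List.intercalate, List.intersperse]
    | cons c cs =>
      have hstep : ∀ (r : List Char) (rs : List (List Char)),
          sep.intercalate (a :: r :: rs) = a ++ sep ++ sep.intercalate (r :: rs) := by
        intro r rs; simp [List.intercalate, List.intersperse]
      have ih' := ih (by simp)
      simp only [List.cons_append] at ih' ⊢
      rw [hstep, hstep, ih']
      simp [List.append_assoc]

-- joining one more string on the right
theorem pv_join_snoc (acc : List String) (x : String) :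
    PySem.Str.join " " (acc ++ [x])
      = if acc = [] then x else String.ofList ((PySem.Str.join " " acc).toList ++ ' ' :: x.toList) := by
  by_cases h : acc = []
  · subst h
    simp [PySem.Str.join, PySem.Chars.join, List.intercalate]
  · rw [if_neg h]
    simp only [PySem.Str.join, PySem.Chars.join, String.toList_ofList, List.map_append,
      List.map_cons, List.map_nil]
    rw [pv_intercalate_snoc _ _ _ (by simpa using h)]
    have : (" " : String).toList = [' '] := rfl
    rw [this]
    simp

theorem pv_join_nil : PySem.Str.join " " ([] : List String) = "" := rfl

-- the fold of B computes length and join of the kept list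
theorem pv_fold_invariant (keep : String → Bool) (xs acc : List String) :
    xs.foldl (pvStep keep) (((acc.length : Int)), PySem.Str.join " " acc)
    = (((acc ++ xs.filter keep).length : Int), PySem.Str.join " " (acc ++ xs.filter keep)) := by
  induction xs generalizing acc with
  | nil => simp
  | cons x xs ih =>
    rw [List.foldl_cons, List.filter_cons]
    by_cases hk : keep x
    · have hstep : pvStep keep (((acc.length : Int)), PySem.Str.join " " acc) x
          = ((((acc ++ [x]).length : Int)), PySem.Str.join " " (acc ++ [x])) := by
        have hlen : (((acc.length : Int)) == 0) = decide (acc = []) := by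
          cases acc with
          | nil => simp
          | cons a as => simp; omega
        rw [pvStep, if_pos hk, pv_join_snoc]
        dsimp only
        rw [hlen]
        by_cases h : acc = [] <;> simp [h]
      rw [hstep, ih (acc ++ [x])]
      simp [hk]
    · rw [pvStep, if_neg (by simp [hk]), ih acc]
      simp [hk]

-- ===== VERDICT (by name: the statement is the Claim_ definition above) =====
theorem filter_MandL_spec : Claim_equal_filter_MandL := by
  intro All m l _
  unfold Spec_filter_MandL filter_MandL filter_MandL_alt
  simp only [PySem.List.foldl_append_if_eq_filter, List.nil_append, List.filter_filter]
  have hBfun : (fun (st : Int × String) head =>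
      if (!(PySem.Set.isdisjoint (PySem.Set.ofList m) ((PySem.Str.slice head (some 0) (some 3)).toList.map (fun c => String.ofList [c]))))
         && (!(PySem.Set.isdisjoint (PySem.Set.ofList l) ((PySem.Str.slice head (some 1) (some 4)).toList.map (fun c => String.ofList [c]))))
      then (st.1 + 1, if st.1 == 0 then head else String.ofList (st.2.toList ++ ' ' :: head.toList))
      else st) = pvStep (pvKeepA m l) := by
    funext st head
    rw [pvStep, pvKeepA, pv_notdisjoint_eq_any, pv_notdisjoint_eq_any]
  rw [hBfun]
  have hinv := pv_fold_invariant (pvKeepA m l) All []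
  rw [pv_join_nil] at hinv
  simp only [List.length_nil, Int.natCast_zero, List.nil_append] at hinv
  rw [hinv]
  rw [List.filter_congr (fun x _ => ?_)]
  simp [pvKeepA, Bool.and_comm]
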